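-- pv_equiv track=rewrite | github.com/afonsomatos/ist-fp-pb-2017 | Capítulo 6.1/ex_09.py | compara
-- ===== SOURCE A (Python) =====
-- def compara(lista, n, menor):
--     if len(lista) == 0:
--         return []
--
--     el  = lista[0]
--     dif = el - n
--
--     if dif >= 0 and menor or dif < 0 and not menor:
--         return compara(lista[1:], n, menor)
--
--     return [el] + compara(lista[1:], n, menor)
-- ===== SOURCE B (Python) =====
-- def compara(lista, n, menor):
--     return [el for el in lista if (el >= n) != menor]
-- ===== Notes on version B (the rewrite author's own statement) =====
-- stated objective: simpler
-- what changed: Replaces the recursion over lista[1:] with a single filter comprehension whose predicate collapses A's four-way and/or condition to the boolean inequality test (el >= n) != menor.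
import Mathlib
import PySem

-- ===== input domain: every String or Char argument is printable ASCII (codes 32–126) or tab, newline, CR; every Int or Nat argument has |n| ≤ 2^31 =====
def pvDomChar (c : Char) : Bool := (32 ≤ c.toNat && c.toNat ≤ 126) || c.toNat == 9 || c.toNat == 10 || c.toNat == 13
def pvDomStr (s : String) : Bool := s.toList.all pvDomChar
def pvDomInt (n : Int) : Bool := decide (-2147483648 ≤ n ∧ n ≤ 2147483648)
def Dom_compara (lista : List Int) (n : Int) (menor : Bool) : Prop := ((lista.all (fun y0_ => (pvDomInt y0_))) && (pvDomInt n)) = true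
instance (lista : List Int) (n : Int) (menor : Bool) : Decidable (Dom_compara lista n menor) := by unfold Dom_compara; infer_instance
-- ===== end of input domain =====

-- B replaces A's recursion over lista[1:] with one filter over the list, the keep test collapsed to (el ≥ n) ≠ menor; objective: simpler.

-- ===== PORT A =====
def compara (lista : List Int) (n : Int) (menor : Bool) : List Int :=
  match lista with
  | [] => []
  | el :: rest =>
    let dif := el - n
    if (decide (dif ≥ 0) && menor) || (decide (dif < 0) && !menor) then
      compara rest n menor
    else
      [el] ++ compara rest n menor

-- ===== PORT B =====
def compara_alt (lista : List Int) (n : Int) (menor : Bool) : List Int :=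
  lista.filter (fun el => decide (el ≥ n) != menor)

-- ===== PRECONDITION & SPEC =====
def Spec_compara (lista : List Int) (n : Int) (menor : Bool) (out : List Int) : Prop := out = compara_alt lista n menor
instance (lista : List Int) (n : Int) (menor : Bool) (out : List Int) : Decidable (Spec_compara lista n menor out) := by unfold Spec_compara; infer_instance

-- ===== CLAIM (what is proved, stated in full; the proofs are below) =====
def Claim_equal_compara : Prop := ∀ (lista : List Int) (n : Int) (menor : Bool), Dom_compara lista n menor → Spec_compara lista n menor (compara lista n menor)

-- ===== LEMMAS AND PROOFS =====
theorem compara_eq_alt (lista : List Int) (n : Int) (menor : Bool) :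
    compara lista n menor = compara_alt lista n menor := by
  induction lista with
  | nil => simp [compara, compara_alt]
  | cons el rest ih =>
    simp only [compara, compara_alt, List.filter_cons] at *
    rw [ih]
    by_cases h : el ≥ n <;> cases menor <;> simp_all

-- ===== VERDICT (by name: the statement is the Claim_ definition above) =====
theorem compara_spec : Claim_equal_compara := by
  intro lista n menor _
  exact compara_eq_alt lista n menor
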